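-- pv_equiv track=rewrite | github.com/kevin-a-nelson/Foundations-of-AI | HW1/question2.py | getHCosts
-- ===== SOURCE A (Python) =====
-- def getHCosts(nodes):
--     endNode = getEndNode(nodes)
--
--     hueristicValues = []
--     for rowIdx, row in enumerate(nodes):
--         rowValues = []
--         for colIdx, _ in enumerate(row):
--             rowDiff = abs(rowIdx - endNode[0])
--             colDiff = abs(colIdx - endNode[1])
--             rowValues.append(rowDiff + colDiff)
--         hueristicValues.append(rowValues)
--     return hueristicValues
--
-- def getEndNode(nodes):
--     for rowIdx, row in enumerate(nodes):
--         for colIdx, _ in enumerate(row):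
--             if nodes[rowIdx][colIdx] == END:
--                 return [rowIdx, colIdx]
--
-- END = "EN "
-- ===== SOURCE B (Python) =====
-- END = "EN "
--
-- def getEndNode(nodes):
--     # locate END in the flattened grid, then decode the flat index
--     # back to (row, col) by subtracting row lengths
--     flat = [cell for row in nodes for cell in row]
--     if END not in flat:
--         return None
--     k = flat.index(END)
--     for i, row in enumerate(nodes):
--         if k < len(row):
--             return [i, k]
--         k -= len(row)
--
-- def getHCosts(nodes):
--     er, ec = getEndNode(nodes)
--     out = []
--     for i, row in enumerate(nodes):
--         b, m = abs(i - er), len(row)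
--         # each row is two arithmetic ranges meeting at the end column:
--         # descending toward column ec, then ascending away from it
--         out.append(list(range(b + ec, b + max(ec - m, 0), -1)) +
--                    list(range(b, b + m - ec)))
--     return out
-- ===== Notes on version B (the rewrite author's own statement) =====
-- stated objective: alternative
-- what changed: The end node is located by flattening the grid, taking one flat .index(END), and decoding the flat position back to (row, col) by subtracting row lengths; each output row is then built as the concatenation of two arithmetic ranges meeting at the end column (descending toward it, ascending away), with no per-cell abs of the column difference.
-- outside the precondition, e.g. on getHCosts([[], []]): A returns [[], []], B raises TypeError
import Mathlib
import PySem

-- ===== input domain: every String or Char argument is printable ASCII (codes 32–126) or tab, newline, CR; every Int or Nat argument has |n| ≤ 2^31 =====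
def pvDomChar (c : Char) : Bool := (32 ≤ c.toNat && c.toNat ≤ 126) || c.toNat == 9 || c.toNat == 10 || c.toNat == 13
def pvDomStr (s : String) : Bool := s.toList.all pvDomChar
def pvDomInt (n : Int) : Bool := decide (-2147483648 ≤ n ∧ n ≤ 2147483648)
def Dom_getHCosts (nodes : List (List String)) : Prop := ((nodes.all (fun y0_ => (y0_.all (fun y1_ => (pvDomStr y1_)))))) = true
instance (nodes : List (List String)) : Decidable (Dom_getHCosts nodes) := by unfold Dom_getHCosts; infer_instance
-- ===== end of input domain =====

-- B finds the end node by one flat .index on the flattened grid, decoded back to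
-- (row, col) via row lengths, and builds each output row as two arithmetic ranges
-- meeting at the end column instead of a per-cell abs (objective: alternative).

-- ===== PORT A =====
-- inner loop of A's getEndNode: scan a row left to right, comparing each cell to END
def pvEndInRowA (ri : Int) (ci : Int) : List String → Option (Int × Int)
  | [] => none
  | c :: cs => if c == "EN " then some (ri, ci) else pvEndInRowA ri (ci + 1) cs

-- outer loop of A's getEndNode
def pvGetEndNodeA (ri : Int) : List (List String) → Option (Int × Int)
  | [] => none
  | r :: rs =>
    match pvEndInRowA ri 0 r with
    | some p => some p
    | none => pvGetEndNodeA (ri + 1) rs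

def getHCosts (nodes : List (List String)) : List (List Int) :=
  let endNode := pvGetEndNodeA 0 nodes
  (PySem.List.enumerate nodes 0).map (fun p =>
    (PySem.List.enumerate p.2 0).map (fun q =>
      -- endNode[0]/endNode[1] are only evaluated inside the inner loop;
      -- with endNode = None Python raises TypeError there (excluded by Pre_getHCosts)
      match endNode with
      | some (er, ec) => |p.1 - er| + |q.1 - ec|
      | none => 0))

-- ===== PORT B =====
-- B's decode loop: walk the rows subtracting row lengths from the flat index
def pvDecodeB (ri : Int) (k : Int) : List (List String) → Option (Int × Int)
  | [] => none
  | r :: rs =>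
    if k < (r.length : Int) then some (ri, k) else pvDecodeB (ri + 1) (k - r.length) rs

-- B's getEndNode: flatten, one flat index of END, decode
def pvGetEndNodeB (nodes : List (List String)) : Option (Int × Int) :=
  let flat := nodes.flatMap id
  if "EN " ∈ flat then
    match PySem.List.index? flat "EN " with
    | some k => pvDecodeB 0 (k : Int) nodes
    | none => none
  else none

def getHCosts_alt (nodes : List (List String)) : List (List Int) :=
  match pvGetEndNodeB nodes with
  | none => []  -- here B raises TypeError (unpacking None); excluded by Pre_getHCosts
  | some (er, ec) =>
    (PySem.List.enumerate nodes 0).map (fun p =>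
      let b := |p.1 - er|
      let m := (p.2.length : Int)
      PySem.List.pyRange (b + ec) (b + max (ec - m) 0) (-1) ++
      PySem.List.pyRange b (b + (m - ec)) 1)

-- ===== PRECONDITION & SPEC =====
-- Pre_ excludes grids with no "EN " cell: there getEndNode returns None and both
-- Pythons raise TypeError when they use it — except that A happens to return a list
-- of empty rows when every row is empty (its subscript is never reached, an artefact
-- of A's loop nesting), where B still raises.
def Pre_getHCosts (nodes : List (List String)) : Prop := ∃ r ∈ nodes, "EN " ∈ r
instance (nodes : List (List String)) : Decidable (Pre_getHCosts nodes) := by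
  unfold Pre_getHCosts; infer_instance

def pvWitness_getHCosts : List (List String) := [["a", "b"], ["EN ", "c"]]

def Spec_getHCosts (nodes : List (List String)) (out : List (List Int)) : Prop := out = getHCosts_alt nodes
instance (nodes : List (List String)) (out : List (List Int)) : Decidable (Spec_getHCosts nodes out) := by unfold Spec_getHCosts; infer_instance

-- ===== CLAIM (what is proved, stated in full; the proofs are below) =====
def Claim_equal_getHCosts : Prop := ∀ (nodes : List (List String)), Dom_getHCosts nodes → Pre_getHCosts nodes → Spec_getHCosts nodes (getHCosts nodes)

-- ===== LEMMAS AND PROOFS =====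

-- A's inner row scan equals index?-based lookup
lemma pvEndInRowA_eq (r : List String) (ri : Int) (c : Int) :
    pvEndInRowA ri c r
      = Option.map (fun (k : Nat) => (ri, c + (k : Int))) (PySem.List.index? r "EN ") := by
  induction r generalizing c with
  | nil => simp [pvEndInRowA, PySem.List.index?]
  | cons x xs ih =>
    by_cases hx : x = "EN "
    · subst hx
      rw [PySem.List.index?_cons_self]
      simp [pvEndInRowA]
    · rw [PySem.List.index?_cons_of_ne xs hx]
      simp only [pvEndInRowA, beq_iff_eq, hx, if_false, ih (c + 1), Option.map_map]
      congr 1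
      funext k
      simp only [Function.comp_apply]
      congr 1
      push_cast
      ring

-- index? skips a prefix that does not contain the value
lemma pvIndex?_append_of_not_mem (l t : List String) (h : "EN " ∉ l) :
    PySem.List.index? (l ++ t) "EN " = (PySem.List.index? t "EN ").map (· + l.length) := by
  induction l with
  | nil => simp
  | cons x xs ih =>
    have hx : x ≠ "EN " := fun hx => h (by simp [hx])
    rw [List.cons_append, PySem.List.index?_cons_of_ne _ hx,
        ih (fun hm => h (List.mem_cons_of_mem _ hm)), Option.map_map]
    congr 1

-- B's flat-index-then-decode equals A's row-major scan (at any starting row index)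
lemma pvEndNode_eq (nodes : List (List String)) (ri : Int) :
    (match PySem.List.index? (nodes.flatMap id) "EN " with
     | some k => pvDecodeB ri (k : Int) nodes
     | none => none)
      = pvGetEndNodeA ri nodes := by
  induction nodes generalizing ri with
  | nil => simp [pvGetEndNodeA, PySem.List.index?]
  | cons r rs ih =>
    simp only [List.flatMap_cons, id_eq, pvGetEndNodeA, pvEndInRowA_eq r ri 0]
    by_cases hm : "EN " ∈ r
    · rw [PySem.List.index?_append_of_mem _ hm]
      obtain ⟨k, hk⟩ := Option.isSome_iff_exists.mp
        ((PySem.List.index?_isSome_iff r "EN ").mpr hm)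
      obtain ⟨hklt, -, -⟩ := PySem.List.getElem_of_index?_eq_some hk
      rw [hk]
      simp [pvDecodeB, hklt]
    · rw [pvIndex?_append_of_not_mem _ _ hm,
          (PySem.List.index?_eq_none_iff r "EN ").mpr hm]
      have h2 := ih (ri + 1)
      cases hks : PySem.List.index? (rs.flatMap id) "EN " with
      | none =>
        rw [hks] at h2
        simpa using h2
      | some k =>
        rw [hks] at h2
        simp only [Option.map_some, pvDecodeB]
        rw [if_neg (by push_cast; omega)]
        rw [show ((k + r.length : Nat) : Int) - (r.length : Int) = (k : Int) by push_cast; ring]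
        simpa using h2

-- A's end node has nonnegative coordinates
lemma pvEndNodeA_nonneg (nodes : List (List String)) (ri : Int) (er ec : Int)
    (hri : 0 ≤ ri) (h : pvGetEndNodeA ri nodes = some (er, ec)) : 0 ≤ er ∧ 0 ≤ ec := by
  induction nodes generalizing ri with
  | nil => simp [pvGetEndNodeA] at h
  | cons r rs ih =>
    simp only [pvGetEndNodeA, pvEndInRowA_eq r ri 0] at h
    cases hk : PySem.List.index? r "EN " with
    | some k =>
      rw [hk] at h
      simp only [Option.map_some] at h
      obtain ⟨rfl, rfl⟩ := Prod.mk.injEq .. ▸ Option.some.injEq .. ▸ h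
      constructor <;> positivity
    | none =>
      rw [hk] at h
      exact ih (ri + 1) (by omega) h

-- under Pre_, A's end-node search succeeds
lemma pvGetEndNodeA_isSome (nodes : List (List String)) (ri : Int)
    (h : ∃ r ∈ nodes, "EN " ∈ r) : (pvGetEndNodeA ri nodes).isSome := by
  induction nodes generalizing ri with
  | nil => simp at h
  | cons r rs ih =>
    simp only [pvGetEndNodeA, pvEndInRowA_eq r ri 0]
    cases hk : PySem.List.index? r "EN " with
    | some k => simp
    | none =>
      obtain ⟨r', hr', he⟩ := h
      rcases List.mem_cons.mp hr' with rfl | hr'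
      · exact absurd he ((PySem.List.index?_eq_none_iff _ "EN ").mp hk)
      · simpa using ih (ri + 1) ⟨r', hr', he⟩

-- the two-range row equals the per-cell abs row
lemma pvRow_eq (b ec m : Int) (hec : 0 ≤ ec) :
    PySem.List.pyRange (b + ec) (b + max (ec - m) 0) (-1) ++
      PySem.List.pyRange b (b + (m - ec)) 1
    = (PySem.List.pyRange 0 m 1).map (fun j => b + |j - ec|) := by
  by_cases hm : m ≤ ec
  · rw [PySem.List.pyRange_one_eq_nil (by omega), List.append_nil,
        PySem.List.pyRange_neg_one, PySem.List.pyRange_one, List.map_map]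
    rw [show (b + ec - (b + max (ec - m) 0)).toNat = (m - 0).toNat by omega]
    apply List.map_congr_left
    intro k hk
    simp only [List.mem_range] at hk
    have : (k : Int) < m - 0 := Int.lt_toNat.mp hk
    simp only [Function.comp_apply, zero_add]
    rw [abs_of_nonpos (by omega)]
    ring
  · rw [show max (ec - m) 0 = 0 by omega, add_zero,
        PySem.List.pyRange_one_append 0 ec m hec (by omega), List.map_append]
    congr 1
    · rw [PySem.List.pyRange_neg_one, PySem.List.pyRange_one, List.map_map]
      rw [show (b + ec - b).toNat = (ec - 0).toNat by omega]
      apply List.map_congr_left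
      intro k hk
      simp only [List.mem_range] at hk
      have : (k : Int) < ec - 0 := Int.lt_toNat.mp hk
      simp only [Function.comp_apply, zero_add]
      rw [abs_of_nonpos (by omega)]
      ring
    · rw [PySem.List.pyRange_one (a := b), PySem.List.pyRange_one (a := ec), List.map_map]
      rw [show (b + (m - ec) - b).toNat = (m - ec).toNat by omega]
      apply List.map_congr_left
      intro k hk
      simp only [Function.comp_apply]
      rw [abs_of_nonneg (by omega)]
      ring

theorem getHCosts_spec : Claim_equal_getHCosts := by
  intro nodes _ hpre
  unfold Spec_getHCosts getHCosts getHCosts_alt pvGetEndNodeB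
  have hmem : "EN " ∈ nodes.flatMap id := by
    obtain ⟨r, hr, he⟩ := hpre
    exact List.mem_flatMap.mpr ⟨r, hr, he⟩
  simp only [hmem, if_pos]
  rw [pvEndNode_eq nodes 0]
  cases hend : pvGetEndNodeA 0 nodes with
  | none =>
    exact absurd (pvGetEndNodeA_isSome nodes 0 hpre) (by simp [hend])
  | some p =>
    obtain ⟨er, ec⟩ := p
    obtain ⟨her, hec⟩ := pvEndNodeA_nonneg nodes 0 er ec le_rfl hend
    simp only
    apply List.map_congr_left
    intro q hq
    obtain ⟨k, hk, rfl⟩ := (PySem.List.mem_enumerate_iff nodes 0 q).mp hq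
    rw [pvRow_eq |(0 : Int) + k - er| ec (nodes[k].length : Int) hec]
    -- A's inner map over enumerate = map over the index range
    rw [show (PySem.List.enumerate nodes[k] 0).map
          (fun q => |(0 : Int) + (k : Int) - er| + |q.1 - ec|)
        = ((PySem.List.enumerate nodes[k] 0).map (·.1)).map
          (fun j => |(0 : Int) + (k : Int) - er| + |j - ec|) by
      rw [List.map_map]; rfl]
    rw [PySem.List.map_fst_enumerate]
    norm_num
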